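-- pv_equiv track=rewrite | github.com/Ova-Klik/PHASEGATE | PYTHON/GATE THREE/day_three_function.py | modify_length_of_a_given_array
-- ===== SOURCE A (Python) =====
-- def modify_length_of_a_given_array(the_list, length):
--
--     new_list=[]
--
--     if length<=0: return the_list
--
--     for index in range (0,length,1):
--
--         if index<len(the_list):
--
--             new_list.append(the_list[index])
--
--         else:
--             new_list.append(-1)
--
--     return new_list
-- ===== SOURCE B (Python) =====
-- def modify_length_of_a_given_array(the_list, length):
--     if length <= 0:
--         return the_list
--     return the_list[:length] + [-1] * (length - len(the_list))
-- ===== Notes on version B (the rewrite author's own statement) =====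
-- stated objective: simpler
-- what changed: The per-index loop with an in-bounds branch is replaced by a two-region decomposition: a bulk slice prefix plus a bulk padding block built by list multiplication, with no loop at all.
import Mathlib
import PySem

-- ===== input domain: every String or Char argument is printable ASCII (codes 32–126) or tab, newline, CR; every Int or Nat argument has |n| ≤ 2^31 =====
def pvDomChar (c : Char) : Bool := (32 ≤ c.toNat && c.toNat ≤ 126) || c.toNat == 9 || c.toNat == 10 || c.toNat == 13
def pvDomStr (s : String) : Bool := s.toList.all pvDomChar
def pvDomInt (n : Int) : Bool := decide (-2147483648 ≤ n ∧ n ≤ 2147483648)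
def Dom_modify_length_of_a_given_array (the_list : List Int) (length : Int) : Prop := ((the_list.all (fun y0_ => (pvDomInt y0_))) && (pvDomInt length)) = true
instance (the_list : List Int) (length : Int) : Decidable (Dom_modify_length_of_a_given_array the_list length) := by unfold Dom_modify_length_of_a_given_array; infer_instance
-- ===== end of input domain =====

-- B replaces A's per-index append loop by a slice-prefix plus replicate-padding decomposition (simpler, no loop).


-- ===== PORT A =====
-- the_list[index] is in range on the taken branch; pyGetD is exact there
def modify_length_of_a_given_array (the_list : List Int) (length : Int) : List Int :=
  if length ≤ 0 then the_list
  else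
    (PySem.List.pyRange 0 length 1).foldl
      (fun new_list index =>
        if index < (the_list.length : Int) then
          new_list ++ [PySem.List.pyGetD the_list index (-1)]
        else
          new_list ++ [-1]) []

-- ===== PORT B =====
def modify_length_of_a_given_array_alt (the_list : List Int) (length : Int) : List Int :=
  if length ≤ 0 then the_list
  else
    PySem.List.slice the_list none (some length) ++
      List.replicate (length - (the_list.length : Int)).toNat (-1)

-- ===== PRECONDITION & SPEC =====
def Spec_modify_length_of_a_given_array (the_list : List Int) (length : Int) (out : List Int) : Prop := out = modify_length_of_a_given_array_alt the_list length
instance (the_list : List Int) (length : Int) (out : List Int) : Decidable (Spec_modify_length_of_a_given_array the_list length out) := by unfold Spec_modify_length_of_a_given_array; infer_instance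

-- ===== CLAIM (what is proved, stated in full; the proofs are below) =====
def Claim_equal_modify_length_of_a_given_array : Prop := ∀ (the_list : List Int) (length : Int), Dom_modify_length_of_a_given_array the_list length → Spec_modify_length_of_a_given_array the_list length (modify_length_of_a_given_array the_list length)

-- ===== LEMMAS AND PROOFS =====

theorem pv_key (xs : List Int) (n : Nat) :
    (PySem.List.pyRange 0 (n : Int) 1).map
      (fun i => if i < (xs.length : Int) then PySem.List.pyGetD xs i (-1) else -1)
    = xs.take n ++ List.replicate (n - xs.length) (-1) := by
  induction n with
  | zero => simp [PySem.List.pyRange_one_eq_nil]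
  | succ m ih =>
    have hr : PySem.List.pyRange 0 ((m : Int) + 1) 1
        = PySem.List.pyRange 0 (m : Int) 1 ++ [(m : Int)] :=
      PySem.List.pyRange_one_succ_right (by positivity)
    have hcast : (((m + 1 : Nat)) : Int) = (m : Int) + 1 := by push_cast; ring
    rw [hcast, hr, List.map_append, ih]
    by_cases h : m < xs.length
    · have h1 : m + 1 - xs.length = 0 := by omega
      have h2 : m - xs.length = 0 := by omega
      have h3 : ((m : Int)) < (xs.length : Int) := by exact_mod_cast h
      have hget : PySem.List.pyGetD xs (m : Int) (-1) = xs[m] := by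
        rw [PySem.List.pyGetD_eq_getElem xs (-1) (Int.natCast_nonneg m) h3]
        simp
      have htake : xs.take (m + 1) = xs.take m ++ [xs[m]] := by
        rw [List.take_add_one, List.getElem?_eq_getElem h]
        rfl
      rw [h1, h2, htake]
      simp only [List.replicate_zero, List.append_nil, List.map_cons, List.map_nil]
      rw [if_pos h3, hget]
    · have h1 : m + 1 - xs.length = (m - xs.length) + 1 := by omega
      have h2 : xs.take (m + 1) = xs.take m := by
        rw [List.take_of_length_le (by omega), List.take_of_length_le (by omega)]
      have h3 : ¬ ((m : Int) < (xs.length : Int)) := by exact_mod_cast h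
      simp [h1, h2, h3, List.replicate_succ']

theorem modify_length_eq (the_list : List Int) (length : Int) :
    modify_length_of_a_given_array the_list length
      = modify_length_of_a_given_array_alt the_list length := by
  unfold modify_length_of_a_given_array modify_length_of_a_given_array_alt
  by_cases hl : length ≤ 0
  · simp [hl]
  · simp only [hl, if_false]
    have hpos : 0 ≤ length := by omega
    have hcast : length = ((length.toNat : Nat) : Int) := by omega
    calc
      (PySem.List.pyRange 0 length 1).foldl
          (fun new_list index =>
            if index < (the_list.length : Int) then
              new_list ++ [PySem.List.pyGetD the_list index (-1)]
            else new_list ++ [-1]) []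
        = (PySem.List.pyRange 0 length 1).foldl
            (fun new_list index =>
              new_list ++ [if index < (the_list.length : Int) then
                  PySem.List.pyGetD the_list index (-1) else -1]) [] := by
            apply PySem.List.foldl_congr_mem
            intro acc x _
            split_ifs <;> rfl
      _ = (PySem.List.pyRange 0 length 1).map
            (fun index => if index < (the_list.length : Int) then
                PySem.List.pyGetD the_list index (-1) else -1) := by
            rw [PySem.List.foldl_append_singleton_eq_map]; rfl
      _ = (PySem.List.pyRange 0 ((length.toNat : Nat) : Int) 1).map
            (fun i => if i < (the_list.length : Int) then
                PySem.List.pyGetD the_list i (-1) else -1) := by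
            rw [← hcast]
      _ = the_list.take length.toNat
            ++ List.replicate (length.toNat - the_list.length) (-1) := pv_key _ _
      _ = PySem.List.slice the_list none (some length)
            ++ List.replicate (length - (the_list.length : Int)).toNat (-1) := by
            rw [PySem.List.slice_to (b := length) the_list hpos]
            congr 1
            congr 1
            omega

-- ===== VERDICT (by name: the statement is the Claim_ definition above) =====
theorem modify_length_of_a_given_array_spec : Claim_equal_modify_length_of_a_given_array := by
  intro the_list length _
  exact modify_length_eq the_list length
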